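-- pv_equiv track=rewrite | github.com/DoHoonKim8/PS | Programmers/Heap/Scoville.py | solution
-- ===== SOURCE A (Python) =====
-- import heapq
--
-- def solution(scoville, K):
--     answer = 0
--     heapq.heapify(scoville)
--     while len(scoville):
--         a = heapq.heappop(scoville)
--         if a >= K:
--             return answer
--         elif len(scoville) == 0:
--             return -1
--         else:
--             b = heapq.heappop(scoville)
--             heapq.heappush(scoville, a + 2 * b)
--             answer += 1
--     return -1
-- ===== SOURCE B (Python) =====
-- def solution(scoville, K):
--     # Two-queue selection: sort once, then repeatedly take the smallest pot
--     # from the fronts of two nondecreasing queues -- the sorted input and a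
--     # FIFO queue of newly mixed pots (which stays nondecreasing).  No heap
--     # and no insertion into the middle of a list.  (Sorts scoville in place;
--     # only the return value is claimed equal to A's.)
--     scoville.sort()
--     made = []
--     i = j = 0
--     answer = 0
--
--     def pop():
--         nonlocal i, j
--         if j == len(made) or (i < len(scoville) and scoville[i] <= made[j]):
--             v = scoville[i]; i += 1
--         else:
--             v = made[j]; j += 1
--         return v
--
--     while i < len(scoville) or j < len(made):
--         a = pop()
--         if a >= K:
--             return answer
--         if i == len(scoville) and j == len(made):
--             return -1
--         b = pop()
--         made.append(a + 2 * b)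
--         answer += 1
--     return -1
-- ===== Notes on version B (the rewrite author's own statement) =====
-- stated objective: alternative
-- what changed: Replaces the heap entirely by the classic two-queue selection: sort the input once, then merge the sorted list with a FIFO queue of freshly mixed pots (kept nondecreasing), taking each minimum in O(1) from the two queue fronts instead of O(log n) heap operations.
import Mathlib
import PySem

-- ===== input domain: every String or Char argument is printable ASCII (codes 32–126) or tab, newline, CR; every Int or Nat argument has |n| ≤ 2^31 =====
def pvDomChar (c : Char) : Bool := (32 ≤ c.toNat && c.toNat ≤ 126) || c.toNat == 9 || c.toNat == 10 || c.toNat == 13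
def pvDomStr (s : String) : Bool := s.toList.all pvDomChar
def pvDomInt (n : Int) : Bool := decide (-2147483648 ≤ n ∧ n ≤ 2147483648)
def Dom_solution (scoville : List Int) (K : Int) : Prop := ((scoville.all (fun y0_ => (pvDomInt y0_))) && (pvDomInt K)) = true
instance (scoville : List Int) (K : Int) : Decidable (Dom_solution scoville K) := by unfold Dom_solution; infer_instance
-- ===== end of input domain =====

-- B replaces A's binary heap (heapq) by the two-queue selection: sort the input once, then
-- take each minimum in O(1) from the fronts of two nondecreasing queues — the sorted input
-- and a FIFO queue of freshly mixed pots; objective: alternative algorithm, same return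
-- value.  Both Pythons mutate `scoville` in place (A heapifies it, B sorts it); the
-- equivalence proved here is about the RETURN value only.

-- ===== PORT A =====
-- Transliteration of CPython's heapq._siftdown(heap, startpos, pos): the up-walk that moves
-- the hole at `pos` toward `startpos` carrying `newitem`.  Python performs the final
-- `heap[pos] = newitem` write; here that write is the terminal `h.set pos newitem` (the loop
-- body never reads position `pos`, so the array states coincide step for step).
def siftdownAux (startpos : Nat) (newitem : Int) (h : List Int) (pos : Nat) : List Int :=
  if _h : startpos < pos then
    let parentpos := (pos - 1) / 2
    let parent := h.getD parentpos 0
    if newitem < parent then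
      siftdownAux startpos newitem (h.set pos parent) parentpos
    else h.set pos newitem
  else h.set pos newitem
  termination_by pos
  decreasing_by exact Nat.lt_of_le_of_lt (Nat.div_le_self _ 2) (Nat.sub_lt (Nat.zero_lt_of_lt _h) Nat.one_pos)

-- Transliteration of the while-loop of heapq._siftup: move the hole down along smaller
-- children until it reaches a leaf (rightpos = childpos + 1 is inlined).
def siftupLoop (newitem : Int) (h : List Int) (pos : Nat) : List Int × Nat :=
  if _h : 2 * pos + 1 < h.length then
    let childpos := if 2 * pos + 2 < h.length ∧ ¬ (h.getD (2 * pos + 1) 0 < h.getD (2 * pos + 2) 0)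
                    then 2 * pos + 2 else 2 * pos + 1
    siftupLoop newitem (h.set pos (h.getD childpos 0)) childpos
  else (h, pos)
  termination_by h.length - pos
  decreasing_by simp only [List.length_set]; split at * <;> omega

-- heapq._siftup(heap, pos): sift to a leaf, write newitem there, then _siftdown back up.
def siftup (h : List Int) (pos : Nat) : List Int :=
  let newitem := h.getD pos 0
  let p := siftupLoop newitem h pos
  siftdownAux pos newitem (p.1.set p.2 newitem) p.2

-- heapq.heapify(x): for i in reversed(range(n//2)): _siftup(x, i)
def heapify (l : List Int) : List Int :=
  ((List.range (l.length / 2)).reverse).foldl (fun acc i => siftup acc i) l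

-- heapq.heappop.  (A only calls it on a non-empty heap; on [] Python raises IndexError and
-- this port's value is irrelevant.)
def heappop (h : List Int) : Int × List Int :=
  let lastelt := h.getD (h.length - 1) 0
  let h2 := h.dropLast
  if h2.isEmpty then (lastelt, h2)
  else
    let returnitem := h2.getD 0 0
    (returnitem, siftup (h2.set 0 lastelt) 0)

-- heapq.heappush(heap, item): append, then _siftdown(heap, 0, len(heap)-1).
def heappush (h : List Int) (item : Int) : List Int :=
  siftdownAux 0 item (h ++ [item]) ((h ++ [item]).length - 1)

-- the while-loop of A's solution.  `fuel` is a totality guard only: every iteration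
-- shrinks the heap by one element (two pops, one push), so any fuel > initial length is
-- never exhausted and the loop is Python's `while len(scoville)` step for step.
def solutionLoop (fuel : Nat) (h : List Int) (K : Int) (answer : Int) : Int :=
  match fuel with
  | 0 => -1
  | fuel + 1 =>
    if h.length ≠ 0 then
      let a := (heappop h).1
      let h2 := (heappop h).2
      if a ≥ K then answer
      else if h2.length = 0 then -1
      else
        let b := (heappop h2).1
        let h3 := (heappop h2).2
        solutionLoop fuel (heappush h3 (a + 2 * b)) K (answer + 1)
    else -1

def solution (scoville : List Int) (K : Int) : Int :=
  solutionLoop (scoville.length + 1) (heapify scoville) K 0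

-- ===== PORT B =====
-- B's inner `pop()` helper: take the smaller front of the two nondecreasing queues
-- (q1 = scoville[i:], q2 = made[j:]; advancing an index = taking the tail).
-- The [], [] case is unreachable under the loop guard.
def popMin (q1 q2 : List Int) : Int × List Int × List Int :=
  match q1, q2 with
  | [], [] => (0, [], [])
  | x :: t, [] => (x, t, [])
  | [], y :: u => (y, [], u)
  | x :: t, y :: u => if x ≤ y then (x, t, y :: u) else (y, x :: t, u)

-- one pop removes exactly one element (cited by altLoop's decreasing_by)
lemma popMin_length (q1 q2 : List Int) (h : ¬ q1.length + q2.length = 0) :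
    (popMin q1 q2).2.1.length + (popMin q1 q2).2.2.length + 1 = q1.length + q2.length := by
  match q1, q2 with
  | [], [] => simp at h
  | x :: t, [] => simp [popMin]
  | [], y :: u => simp [popMin]
  | x :: t, y :: u =>
    rw [popMin]
    split <;> simp <;> omega

-- the while-loop of B's solution over the two queues
def altLoop (q1 q2 : List Int) (K answer : Int) : Int :=
  if h0 : q1.length + q2.length = 0 then -1
  else
    if (popMin q1 q2).1 ≥ K then answer
    else if h2 : (popMin q1 q2).2.1.length + (popMin q1 q2).2.2.length = 0 then -1
    else
      altLoop (popMin (popMin q1 q2).2.1 (popMin q1 q2).2.2).2.1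
        ((popMin (popMin q1 q2).2.1 (popMin q1 q2).2.2).2.2 ++
          [(popMin q1 q2).1 + 2 * (popMin (popMin q1 q2).2.1 (popMin q1 q2).2.2).1])
        K (answer + 1)
  termination_by q1.length + q2.length
  decreasing_by
    have l1 := popMin_length q1 q2 h0
    have l2 := popMin_length (popMin q1 q2).2.1 (popMin q1 q2).2.2 h2
    simp only [List.length_append, List.length_cons, List.length_nil]
    omega

def solution_alt (scoville : List Int) (K : Int) : Int :=
  altLoop (PySem.List.sorted scoville (fun x => x) false) [] K 0

-- ===== PRECONDITION & SPEC =====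
def Spec_solution (scoville : List Int) (K : Int) (out : Int) : Prop := out = solution_alt scoville K
instance (scoville : List Int) (K : Int) (out : Int) : Decidable (Spec_solution scoville K out) := by unfold Spec_solution; infer_instance

-- ===== CLAIM (what is proved, stated in full; the proofs are below) =====
def Claim_equal_solution : Prop := ∀ (scoville : List Int) (K : Int), Dom_solution scoville K → Spec_solution scoville K (solution scoville K)

-- ===== LEMMAS AND PROOFS =====

lemma length_siftdownAux (s : Nat) (x : Int) (q : Nat) (h : List Int) :
    (siftdownAux s x h q).length = h.length := by
  fun_induction siftdownAux <;> simp_all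

lemma length_siftupLoopFst (x : Int) (q : Nat) (h : List Int) :
    (siftupLoop x h q).1.length = h.length := by
  fun_induction siftupLoop <;> simp_all

lemma length_siftup (h : List Int) (q : Nat) : (siftup h q).length = h.length := by
  unfold siftup
  rw [length_siftdownAux, List.length_set, length_siftupLoopFst]

lemma length_heappopSnd (h : List Int) : ((heappop h).2).length = h.length - 1 := by
  by_cases hb : h.dropLast.isEmpty
  · simp [heappop, hb]
  · simp [heappop, hb, length_siftup]

-- `anc s q`: s is an ancestor-or-self of index q in the implicit binary-heap shape.
def anc (s q : Nat) : Prop :=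
  if _h : q ≤ s then q = s else anc s ((q - 1) / 2)
  termination_by q
  decreasing_by
    exact Nat.lt_of_le_of_lt (Nat.div_le_self _ 2)
      (Nat.sub_lt (Nat.zero_lt_of_lt (Nat.lt_of_not_le _h)) Nat.one_pos)

lemma anc_self (s : Nat) : anc s s := by
  unfold anc; simp

lemma anc_le_aux (s : Nat) : ∀ q, anc s q → s ≤ q := by
  intro q
  induction q using Nat.strong_induction_on with
  | _ q ih =>
    intro hq
    rw [anc] at hq
    split at hq
    · omega
    · have := ih ((q - 1) / 2) (by omega) hq; omega

lemma anc_le {s q : Nat} (h : anc s q) : s ≤ q := anc_le_aux s q h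

lemma anc_parent {s q : Nat} (h : anc s q) (hne : s < q) : anc s ((q - 1) / 2) := by
  rw [anc] at h
  split at h
  · omega
  · exact h

lemma anc_zero (q : Nat) : anc 0 q := by
  induction q using Nat.strong_induction_on with
  | _ q ih =>
    rw [anc]
    split
    · omega
    · exact ih _ (by omega)

lemma anc_child {s q c : Nat} (h : anc s q) (hc : c = 2 * q + 1 ∨ c = 2 * q + 2) : anc s c := by
  have hs := anc_le h
  have hc2 : (c - 1) / 2 = q := by omega
  rw [anc]
  split
  · omega
  · rw [hc2]; exact h

-- pairsFrom h s: every parent-child pair whose parent index is ≥ s satisfies the heap order.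
def pairsFrom (h : List Int) (s : Nat) : Prop :=
  ∀ j, 0 < j → j < h.length → s ≤ (j - 1) / 2 → h.getD ((j - 1) / 2) 0 ≤ h.getD j 0

def heapInv (h : List Int) : Prop := pairsFrom h 0

lemma getD_set' (l : List Int) (i j : Nat) (a : Int) (hj : j < l.length) :
    (l.set i a).getD j 0 = if i = j then a else l.getD j 0 := by
  rw [List.getD_eq_getElem _ _ (by simpa using hj), List.getElem_set]
  split
  · rfl
  · exact List.getD_eq_getElem l 0 hj |>.symm

lemma set_getD_self (l : List Int) (i : Nat) (_hi : i < l.length) :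
    l.set i (l.getD i 0) = l := by
  apply List.ext_getElem (by simp)
  intro j h1 h2
  rw [List.getElem_set]
  split
  · rename_i hij; subst hij; exact List.getD_eq_getElem l 0 h2
  · rfl

-- extract-and-replace is a permutation
lemma setExtract_perm (x : Int) : ∀ (t : List Int) (r : Nat), r < t.length →
    (t.getD r 0 :: t.set r x).Perm (x :: t) := by
  intro t
  induction t with
  | nil => intro r hr; simp at hr
  | cons d u ih =>
    intro r hr
    cases r with
    | zero => simpa using List.Perm.swap x d u
    | succ r' =>
      simp only [List.getD_cons_succ, List.set]
      exact ((List.Perm.swap _ _ _).trans ((ih r' (by simpa using hr)).cons d)).trans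
        (List.Perm.swap _ _ _)

lemma swap_set_perm (x : Int) : ∀ (h : List Int) (q r : Nat), q < h.length → r < h.length →
    q ≠ r → ((h.set q (h.getD r 0)).set r x).Perm (h.set q x) := by
  intro h
  induction h with
  | nil => intro q r hq _ _; simp at hq
  | cons c t ih =>
    intro q r hq hr hne
    match q, r with
    | 0, 0 => exact absurd rfl hne
    | 0, r' + 1 =>
      simp only [List.getD_cons_succ, List.set]
      exact setExtract_perm x t r' (by simpa using hr)
    | q' + 1, 0 =>
      simp only [List.getD_cons_zero, List.set]
      have h1 := setExtract_perm x (t.set q' c) q' (by simp; simpa using hq)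
      rw [getD_set' _ _ _ _ (by simpa using hq), if_pos rfl, List.set_set] at h1
      exact h1.symm
    | q' + 1, r' + 1 =>
      simp only [List.getD_cons_succ, List.set]
      exact (ih q' r' (by simpa using hq) (by simpa using hr) (by omega)).cons c

-- heap pairs after the terminal write of the up-walk
lemma sd_base (s q : Nat) (x : Int) (h : List Int) (_hq : q < h.length)
    (hU1 : ∀ j, 0 < j → j < h.length → s ≤ (j - 1) / 2 → j ≠ q →
        h.getD ((j - 1) / 2) 0 ≤ h.getD j 0)
    (hU3 : ∀ j, 0 < j → j < h.length → (j - 1) / 2 = q → x ≤ h.getD j 0)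
    (hparent : 0 < q → s ≤ (q - 1) / 2 → h.getD ((q - 1) / 2) 0 ≤ x) :
    pairsFrom (h.set q x) s := by
  intro j hj0 hjlen hjs
  rw [List.length_set] at hjlen
  rw [getD_set' _ _ _ _ hjlen, getD_set' _ _ _ _ (by omega : (j - 1) / 2 < h.length)]
  split_ifs with h1 h2 h3
  · omega
  · exact hU3 j hj0 hjlen h1.symm
  · subst h3; exact hparent hj0 hjs
  · exact hU1 j hj0 hjlen hjs (by omega)

-- correctness of the up-walk (_siftdown)
lemma siftdownAux_spec (s : Nat) (x : Int) : ∀ (q : Nat) (h : List Int), anc s q → q < h.length →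
    (∀ j, 0 < j → j < h.length → s ≤ (j - 1) / 2 → j ≠ q →
        h.getD ((j - 1) / 2) 0 ≤ h.getD j 0) →
    (∀ j, 0 < j → j < h.length → (j - 1) / 2 = q → s < q →
        h.getD ((q - 1) / 2) 0 ≤ h.getD j 0) →
    (∀ j, 0 < j → j < h.length → (j - 1) / 2 = q → x ≤ h.getD j 0) →
    pairsFrom (siftdownAux s x h q) s ∧ (siftdownAux s x h q).Perm (h.set q x) := by
  intro q
  induction q using Nat.strong_induction_on with
  | _ q ih =>
    intro h hanc hq hU1 hU2 hU3
    by_cases hsq : s < q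
    · by_cases hlt : x < h.getD ((q - 1) / 2) 0
      · rw [siftdownAux]
        simp only [dif_pos hsq, if_pos hlt]
        have hpplt : (q - 1) / 2 < q := by omega
        have hpplen : (q - 1) / 2 < h.length := by omega
        have hancp : anc s ((q - 1) / 2) := anc_parent hanc hsq
        have hsp : s ≤ (q - 1) / 2 := anc_le hancp
        -- auxiliary: pairs of h with parent (q-1)/2 still available below position q
        have hU1' : ∀ j, 0 < j → j < (h.set q (h.getD ((q - 1) / 2) 0)).length →
            s ≤ (j - 1) / 2 → j ≠ (q - 1) / 2 →
            (h.set q (h.getD ((q - 1) / 2) 0)).getD ((j - 1) / 2) 0 ≤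
              (h.set q (h.getD ((q - 1) / 2) 0)).getD j 0 := by
          intro j hj0 hjlen hjs hjne
          rw [List.length_set] at hjlen
          rw [getD_set' _ _ _ _ hjlen, getD_set' _ _ _ _ (by omega : (j - 1) / 2 < h.length)]
          split_ifs with h1 h2 h3
          · omega
          · exact hU2 j hj0 hjlen h1.symm hsq
          · subst h3; exact le_refl _
          · exact hU1 j hj0 hjlen hjs (by omega)
        have hU2' : ∀ j, 0 < j → j < (h.set q (h.getD ((q - 1) / 2) 0)).length →
            (j - 1) / 2 = (q - 1) / 2 → s < (q - 1) / 2 →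
            (h.set q (h.getD ((q - 1) / 2) 0)).getD (((q - 1) / 2 - 1) / 2) 0 ≤
              (h.set q (h.getD ((q - 1) / 2) 0)).getD j 0 := by
          intro j hj0 hjlen hjp hsp'
          rw [List.length_set] at hjlen
          have hgp : ((q - 1) / 2 - 1) / 2 < h.length := by omega
          have hple : s ≤ ((q - 1) / 2 - 1) / 2 := anc_le (anc_parent hancp hsp')
          have hroot : h.getD (((q - 1) / 2 - 1) / 2) 0 ≤ h.getD ((q - 1) / 2) 0 :=
            hU1 ((q - 1) / 2) (by omega) hpplen hple (by omega)
          rw [getD_set' _ _ _ _ hjlen, getD_set' _ _ _ _ hgp]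
          split_ifs with h1 h2 h3
          · omega
          · omega
          · exact hroot
          · have hpair := hU1 j hj0 hjlen (by omega) (by omega)
            rw [hjp] at hpair
            exact le_trans hroot hpair
        have hU3' : ∀ j, 0 < j → j < (h.set q (h.getD ((q - 1) / 2) 0)).length →
            (j - 1) / 2 = (q - 1) / 2 → x ≤ (h.set q (h.getD ((q - 1) / 2) 0)).getD j 0 := by
          intro j hj0 hjlen hjp
          rw [List.length_set] at hjlen
          rw [getD_set' _ _ _ _ hjlen]
          split_ifs with h1
          · exact le_of_lt hlt
          · have hpair := hU1 j hj0 hjlen (by omega) (by omega)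
            rw [hjp] at hpair
            exact le_trans (le_of_lt hlt) hpair
        obtain ⟨P, Q⟩ := ih ((q - 1) / 2) hpplt (h.set q (h.getD ((q - 1) / 2) 0)) hancp
          (by rw [List.length_set]; exact hpplen) hU1' hU2' hU3'
        refine ⟨P, Q.trans ?_⟩
        exact swap_set_perm x h q ((q - 1) / 2) hq hpplen (by omega)
      · rw [siftdownAux]
        simp only [dif_pos hsq, if_neg hlt]
        refine ⟨sd_base s q x h hq hU1 hU3 ?_, List.Perm.refl _⟩
        intro _ _
        omega
    · have hqs : q = s := by have := anc_le hanc; omega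
      rw [siftdownAux]
      simp only [dif_neg hsq]
      refine ⟨sd_base s q x h hq hU1 hU3 ?_, List.Perm.refl _⟩
      intro hq0 hqp
      omega

-- correctness of the down-walk (the while-loop of _siftup)
lemma siftupLoop_spec (s : Nat) (x : Int) : ∀ (q : Nat) (h : List Int), anc s q → q < h.length →
    (∀ j, 0 < j → j < h.length → s ≤ (j - 1) / 2 → j ≠ q → (j - 1) / 2 ≠ q →
        h.getD ((j - 1) / 2) 0 ≤ h.getD j 0) →
    (s < q → ∀ j, 0 < j → j < h.length → (j - 1) / 2 = q →
        h.getD ((q - 1) / 2) 0 ≤ h.getD j 0) →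
    (siftupLoop x h q).1.length = h.length ∧ anc s (siftupLoop x h q).2 ∧
    (siftupLoop x h q).2 < h.length ∧ h.length ≤ 2 * (siftupLoop x h q).2 + 1 ∧
    (∀ j, 0 < j → j < h.length → s ≤ (j - 1) / 2 → j ≠ (siftupLoop x h q).2 →
        (siftupLoop x h q).1.getD ((j - 1) / 2) 0 ≤ (siftupLoop x h q).1.getD j 0) ∧
    ((siftupLoop x h q).1.set (siftupLoop x h q).2 x).Perm (h.set q x) := by
  suffices H : ∀ (n q : Nat) (h : List Int), h.length - q = n → anc s q → q < h.length →
      (∀ j, 0 < j → j < h.length → s ≤ (j - 1) / 2 → j ≠ q → (j - 1) / 2 ≠ q →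
          h.getD ((j - 1) / 2) 0 ≤ h.getD j 0) →
      (s < q → ∀ j, 0 < j → j < h.length → (j - 1) / 2 = q →
          h.getD ((q - 1) / 2) 0 ≤ h.getD j 0) →
      (siftupLoop x h q).1.length = h.length ∧ anc s (siftupLoop x h q).2 ∧
      (siftupLoop x h q).2 < h.length ∧ h.length ≤ 2 * (siftupLoop x h q).2 + 1 ∧
      (∀ j, 0 < j → j < h.length → s ≤ (j - 1) / 2 → j ≠ (siftupLoop x h q).2 →
          (siftupLoop x h q).1.getD ((j - 1) / 2) 0 ≤ (siftupLoop x h q).1.getD j 0) ∧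
      ((siftupLoop x h q).1.set (siftupLoop x h q).2 x).Perm (h.set q x) by
    intro q h; exact H (h.length - q) q h rfl
  intro n
  induction n using Nat.strong_induction_on with
  | _ n ih =>
    intro q h hn hanc hq hA hD2
    by_cases hc : 2 * q + 1 < h.length
    · rw [siftupLoop]
      simp only [dif_pos hc]
      set c : Nat := if 2 * q + 2 < h.length ∧ ¬ (h.getD (2 * q + 1) 0 < h.getD (2 * q + 2) 0)
                     then 2 * q + 2 else 2 * q + 1 with hc_def
      have hcrange : c = 2 * q + 1 ∨ c = 2 * q + 2 := by rw [hc_def]; split <;> simp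
      have hclt : c < h.length := by
        rw [hc_def]; split
        · rename_i hh; exact hh.1
        · exact hc
      have hsq0 : s ≤ q := anc_le hanc
      have hmin : ∀ j, 0 < j → j < h.length → (j - 1) / 2 = q → h.getD c 0 ≤ h.getD j 0 := by
        intro j hj0 hjl hjp
        have hj12 : j = 2 * q + 1 ∨ j = 2 * q + 2 := by omega
        rw [hc_def]
        split
        · rename_i hcond
          rcases hj12 with rfl | rfl
          · exact not_lt.mp hcond.2
          · exact le_refl _
        · rename_i hcond
          rcases hj12 with rfl | rfl
          · exact le_refl _
          · exact le_of_lt (not_not.mp (not_and.mp hcond hjl))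
      have hanc' : anc s c := anc_child hanc hcrange
      have hlen2 : (h.set q (h.getD c 0)).length = h.length := by simp
      have hA' : ∀ j, 0 < j → j < (h.set q (h.getD c 0)).length → s ≤ (j - 1) / 2 →
          j ≠ c → (j - 1) / 2 ≠ c →
          (h.set q (h.getD c 0)).getD ((j - 1) / 2) 0 ≤ (h.set q (h.getD c 0)).getD j 0 := by
        intro j hj0 hjlen hjs hjc hjpc
        rw [hlen2] at hjlen
        rw [getD_set' _ _ _ _ hjlen, getD_set' _ _ _ _ (by omega : (j - 1) / 2 < h.length)]
        split_ifs with h1 h2 h3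
        · omega
        · exact hmin j hj0 hjlen h1.symm
        · subst h3
          have hsq : s < q := by omega
          exact hD2 hsq c (by omega) hclt (by omega)
        · exact hA j hj0 hjlen hjs (by omega) (by omega)
      have hD2' : s < c → ∀ j, 0 < j → j < (h.set q (h.getD c 0)).length → (j - 1) / 2 = c →
          (h.set q (h.getD c 0)).getD ((c - 1) / 2) 0 ≤ (h.set q (h.getD c 0)).getD j 0 := by
        intro _ j hj0 hjlen hjp
        rw [hlen2] at hjlen
        have hpc : (c - 1) / 2 = q := by omega
        rw [getD_set' _ _ _ _ hjlen, getD_set' _ _ _ _ (by omega : (c - 1) / 2 < h.length)]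
        rw [if_pos hpc.symm, if_neg (by omega : ¬ q = j)]
        have hp := hA j hj0 hjlen (by omega) (by omega) (by omega)
        rw [hjp] at hp
        exact hp
      obtain ⟨L, A2, Q2, LF, PR, PM⟩ := ih ((h.set q (h.getD c 0)).length - c)
        (by rw [hlen2]; omega) c (h.set q (h.getD c 0)) rfl hanc' (by rw [hlen2]; omega) hA' hD2'
      rw [hlen2] at L Q2 LF PR
      refine ⟨L, A2, Q2, LF, PR, ?_⟩
      exact PM.trans (swap_set_perm x h q c hq hclt (by omega))
    · rw [siftupLoop]
      simp only [dif_neg hc]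
      refine ⟨by simp, hanc, hq, by omega, ?_, by simp⟩
      intro j hj0 hjlen hjs hjq
      exact hA j hj0 hjlen hjs hjq (by omega)

lemma siftup_spec (h : List Int) (s : Nat) (hs : s < h.length)
    (hA : ∀ j, 0 < j → j < h.length → s ≤ (j - 1) / 2 → j ≠ s → (j - 1) / 2 ≠ s →
        h.getD ((j - 1) / 2) 0 ≤ h.getD j 0) :
    pairsFrom (siftup h s) s ∧ (siftup h s).Perm h := by
  obtain ⟨L, A2, Q2, LF, PR, PM⟩ := siftupLoop_spec s (h.getD s 0) s h (anc_self s) hs hA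
    (fun hss => absurd hss (lt_irrefl s))
  have hlen3 : ((siftupLoop (h.getD s 0) h s).1.set (siftupLoop (h.getD s 0) h s).2
      (h.getD s 0)).length = h.length := by rw [List.length_set]; exact L
  obtain ⟨P, Q⟩ := siftdownAux_spec s (h.getD s 0) (siftupLoop (h.getD s 0) h s).2
    ((siftupLoop (h.getD s 0) h s).1.set (siftupLoop (h.getD s 0) h s).2 (h.getD s 0))
    A2 (by rw [hlen3]; exact Q2)
    (by
      intro j hj0 hjlen hjs hjq
      rw [hlen3] at hjlen
      have hpne : (j - 1) / 2 ≠ (siftupLoop (h.getD s 0) h s).2 := by omega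
      rw [getD_set' _ _ _ _ (by rw [L]; omega),
        getD_set' _ _ _ _ (by rw [L]; exact hjlen),
        if_neg (fun e => hpne e.symm), if_neg (fun e => hjq e.symm)]
      exact PR j hj0 hjlen hjs hjq)
    (by intro j hj0 hjlen hjp _; rw [hlen3] at hjlen; omega)
    (by intro j hj0 hjlen hjp; rw [hlen3] at hjlen; omega)
  constructor
  · exact P
  · refine Q.trans ?_
    rw [List.set_set]
    refine PM.trans ?_
    rw [set_getD_self h s hs]

lemma heapify_aux : ∀ (m : Nat) (h : List Int), 2 * m ≤ h.length →
    (∀ j, 0 < j → j < h.length → m ≤ (j - 1) / 2 → h.getD ((j - 1) / 2) 0 ≤ h.getD j 0) →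
    pairsFrom (((List.range m).reverse).foldl (fun acc i => siftup acc i) h) 0 ∧
    ((((List.range m).reverse).foldl (fun acc i => siftup acc i) h)).Perm h := by
  intro m
  induction m with
  | zero => exact fun h _ hp => ⟨fun j a b _ => hp j a b (by omega), List.Perm.refl _⟩
  | succ m ihm =>
    intro h hm hp
    rw [List.range_succ, List.reverse_append]
    simp only [List.reverse_cons, List.reverse_nil, List.nil_append, List.singleton_append,
      List.foldl_cons]
    have hs : m < h.length := by omega
    obtain ⟨P1, P2⟩ := siftup_spec h m hs (fun j a b c _ e => hp j a b (by omega))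
    have hlen : (siftup h m).length = h.length := P2.length_eq
    obtain ⟨Q1, Q2⟩ := ihm (siftup h m) (by omega) (fun j a b c => P1 j a b c)
    exact ⟨Q1, Q2.trans P2⟩

lemma heapify_spec (l : List Int) : heapInv (heapify l) ∧ (heapify l).Perm l := by
  unfold heapify heapInv
  exact heapify_aux (l.length / 2) l (by omega) (by intro j a b c; omega)

lemma root_min {h : List Int} (hv : heapInv h) : ∀ i, i < h.length → h.getD 0 0 ≤ h.getD i 0 := by
  intro i
  induction i using Nat.strong_induction_on with
  | _ i ih =>
    intro hi
    rcases Nat.eq_zero_or_pos i with h0 | h0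
    · subst h0; exact le_refl _
    · exact le_trans (ih ((i - 1) / 2) (by omega) (by omega)) (hv i h0 hi (by omega))

lemma heappush_spec {h : List Int} (hv : heapInv h) (x : Int) :
    heapInv (heappush h x) ∧ (heappush h x).Perm (x :: h) := by
  unfold heappush heapInv
  have hq0 : (h ++ [x]).length - 1 = h.length := by simp
  rw [hq0]
  obtain ⟨P, Q⟩ := siftdownAux_spec 0 x h.length (h ++ [x]) (anc_zero _) (by simp)
    (by
      intro j hj0 hjlen hjs hjq
      simp only [List.length_append, List.length_cons, List.length_nil] at hjlen
      have hjl : j < h.length := by omega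
      rw [List.getD_append _ _ _ _ hjl, List.getD_append _ _ _ _ (by omega)]
      exact hv j hj0 hjl (by omega))
    (by intro j hj0 hjlen hjp _; simp at hjlen; omega)
    (by intro j hj0 hjlen hjp; simp at hjlen; omega)
  refine ⟨P, Q.trans ?_⟩
  have hset : (h ++ [x]).set h.length x = h ++ [x] := by
    simp
  rw [hset]
  exact List.perm_append_singleton x h

lemma heappop_spec {h : List Int} (hne : h ≠ []) (hv : heapInv h) :
    (heappop h).1 = h.getD 0 0 ∧ heapInv (heappop h).2 ∧
    ((heappop h).1 :: (heappop h).2).Perm h := by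
  have hlen0 : 0 < h.length := List.length_pos_iff.mpr hne
  by_cases hb : h.dropLast.isEmpty
  · have hl1 : h.length = 1 := by
      have := List.isEmpty_iff.mp hb
      have h2 : h.dropLast.length = h.length - 1 := by simp
      rw [this] at h2
      simp at h2
      omega
    obtain ⟨a, rfl⟩ := List.length_eq_one_iff.mp hl1
    refine ⟨rfl, ?_, by simp [heappop]⟩
    intro j hj0 hjl _
    simp [heappop] at hjl
  · have hl2 : 2 ≤ h.length := by
      have : h.dropLast ≠ [] := fun e => hb (by rw [e]; rfl)
      have := List.length_pos_iff.mpr this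
      simp at this
      omega
    have hdl : ∀ k, 0 < k → k < h.length - 1 →
        (h.dropLast.set 0 (h.getD (h.length - 1) 0)).getD k 0 = h.getD k 0 := by
      intro k hk0 hkl
      rw [getD_set' _ _ _ _ (by simp; omega), if_neg (by omega)]
      rw [List.getD_eq_getElem _ _ (by simp; omega), List.getElem_dropLast,
        List.getD_eq_getElem _ _ (by omega)]
    have hE : heappop h = (h.dropLast.getD 0 0,
        siftup (h.dropLast.set 0 (h.getD (h.length - 1) 0)) 0) := by
      rw [heappop]
      simp only [hb]
      rfl
    obtain ⟨P, Q⟩ := siftup_spec (h.dropLast.set 0 (h.getD (h.length - 1) 0)) 0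
      (by simp; omega)
      (by
        intro j hj0 hjlen hjs hjq hjp
        rw [List.length_set] at hjlen
        simp only [List.length_dropLast] at hjlen
        rw [hdl j hj0 (by omega), hdl ((j - 1) / 2) (by omega) (by omega)]
        exact hv j hj0 (by omega) (by omega))
    have hd0 : h.dropLast.getD 0 0 = h.getD 0 0 := by
      rw [List.getD_eq_getElem _ _ (by simp; omega), List.getElem_dropLast,
        List.getD_eq_getElem _ _ (by omega)]
    rw [hE]
    refine ⟨hd0, P, ?_⟩
    dsimp only
    refine (Q.cons _).trans ?_
    -- h.dropLast is nonempty: expose its head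
    obtain ⟨c, t, hct⟩ : ∃ c t, h.dropLast = c :: t := by
      cases hdle : h.dropLast with
      | nil => exact absurd (by rw [hdle]; rfl) (fun e => hb e)
      | cons c t => exact ⟨c, t, rfl⟩
    have hcd : c = h.getD 0 0 := by
      rw [← hd0, hct]
      rfl
    rw [hct]
    simp only [List.set_cons_zero]
    rw [List.getD_cons_zero]
    have hlast : h.getLast hne = h.getD (h.length - 1) 0 := by
      rw [List.getLast_eq_getElem, List.getD_eq_getElem _ _ (by omega)]
    refine ((List.perm_append_singleton _ _).symm.cons c).trans ?_
    have e2 : c :: (t ++ [h.getD (h.length - 1) 0]) = h.dropLast ++ [h.getLast hne] := by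
      rw [hct, hlast]
      rfl
    rw [e2, List.dropLast_append_getLast hne]


lemma heappop_min {h : List Int} (hne : h ≠ []) (hv : heapInv h) :
    ∀ y ∈ h, (heappop h).1 ≤ y := by
  intro y hy
  rw [(heappop_spec hne hv).1]
  obtain ⟨i, hi, rfl⟩ := List.mem_iff_getElem.mp hy
  rw [← List.getD_eq_getElem h 0 hi]
  exact root_min hv i hi

-- ---- B-side lemmas ----

-- popMin on sorted queues: it removes one front element, and that element is a minimum.
lemma popMin_spec (q1 q2 : List Int)
    (h1 : q1.Pairwise (fun a b => a ≤ b)) (h2 : q2.Pairwise (fun a b => a ≤ b))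
    (hne : ¬ (q1 = [] ∧ q2 = [])) :
    ((∃ t, q1 = (popMin q1 q2).1 :: t ∧ (popMin q1 q2).2.1 = t ∧ (popMin q1 q2).2.2 = q2) ∨
     (∃ u, q2 = (popMin q1 q2).1 :: u ∧ (popMin q1 q2).2.1 = q1 ∧ (popMin q1 q2).2.2 = u)) ∧
    (∀ x, x ∈ q1 ++ q2 → (popMin q1 q2).1 ≤ x) := by
  match q1, q2 with
  | [], [] => exact absurd ⟨rfl, rfl⟩ hne
  | x :: t, [] =>
    refine ⟨Or.inl ⟨t, rfl, rfl, rfl⟩, ?_⟩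
    intro z hz
    simp only [popMin, List.append_nil] at *
    rcases List.mem_cons.mp hz with rfl | hz
    · exact le_refl _
    · exact (List.pairwise_cons.mp h1).1 z hz
  | [], y :: u =>
    refine ⟨Or.inr ⟨u, rfl, rfl, rfl⟩, ?_⟩
    intro z hz
    simp only [popMin, List.nil_append] at *
    rcases List.mem_cons.mp hz with rfl | hz
    · exact le_refl _
    · exact (List.pairwise_cons.mp h2).1 z hz
  | x :: t, y :: u =>
    rw [popMin]
    split
    · rename_i hxy
      refine ⟨Or.inl ⟨t, rfl, rfl, rfl⟩, ?_⟩
      intro z hz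
      rcases List.mem_append.mp hz with hz | hz
      · rcases List.mem_cons.mp hz with rfl | hz
        · exact le_refl _
        · exact (List.pairwise_cons.mp h1).1 z hz
      · rcases List.mem_cons.mp hz with rfl | hz
        · exact hxy
        · exact le_trans hxy ((List.pairwise_cons.mp h2).1 z hz)
    · rename_i hxy
      have hyx : y ≤ x := by omega
      refine ⟨Or.inr ⟨u, rfl, rfl, rfl⟩, ?_⟩
      intro z hz
      rcases List.mem_append.mp hz with hz | hz
      · rcases List.mem_cons.mp hz with rfl | hz
        · exact hyx
        · exact le_trans hyx ((List.pairwise_cons.mp h1).1 z hz)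
      · rcases List.mem_cons.mp hz with rfl | hz
        · exact le_refl _
        · exact (List.pairwise_cons.mp h2).1 z hz

-- popping is a permutation: popped element on top of the two remainders
lemma pop_perm {a : Int} {q1 q2 r1 r2 : List Int}
    (hd : (∃ t, q1 = a :: t ∧ r1 = t ∧ r2 = q2) ∨ (∃ u, q2 = a :: u ∧ r1 = q1 ∧ r2 = u)) :
    (a :: (r1 ++ r2)).Perm (q1 ++ q2) := by
  rcases hd with ⟨t, he, e1, e2⟩ | ⟨u, he, e1, e2⟩
  · rw [he, e1, e2, List.cons_append]
  · rw [he, e1, e2]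
    exact List.perm_middle.symm

-- the invariant carried for the queue of mixed pots: removing any one occurrence m from q2,
-- if p ≤ q are the two smallest of everything else, then m ≤ p + 2q.
def Pinv (q1 q2 : List Int) : Prop :=
  ∀ m q2', q2.Perm (m :: q2') →
    ∀ p q r, (q1 ++ q2').Perm (p :: q :: r) → p ≤ q → (∀ x ∈ r, q ≤ x) → m ≤ p + 2 * q

-- the main simulation: the heap loop and the two-queue loop return the same answer
lemma loop_eq : ∀ (n fuel : Nat) (h q1 q2 : List Int) (K ans : Int),
    q1.length + q2.length = n → n < fuel → heapInv h → (q1 ++ q2).Perm h →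
    q1.Pairwise (fun a b => a ≤ b) → q2.Pairwise (fun a b => a ≤ b) → Pinv q1 q2 →
    solutionLoop fuel h K ans = altLoop q1 q2 K ans := by
  intro n
  induction n using Nat.strong_induction_on with
  | _ n ih =>
    intro fuel h q1 q2 K ans hlen hfuel hv hperm hs1 hs2 hPinv
    obtain ⟨f, rfl⟩ : ∃ f, fuel = f + 1 := ⟨fuel - 1, by omega⟩
    have hhlen : h.length = n := by
      rw [← hperm.length_eq, List.length_append, hlen]
    rw [solutionLoop, altLoop]
    by_cases hn0 : q1.length + q2.length = 0
    · rw [dif_pos hn0]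
      rw [hlen] at hn0
      simp [hhlen, hn0]
    · rw [dif_neg hn0]
      rw [if_pos (by omega : h.length ≠ 0)]
      have hne12 : ¬ (q1 = [] ∧ q2 = []) := by
        rintro ⟨rfl, rfl⟩; simp at hn0
      obtain ⟨Hstr, Hmin⟩ := popMin_spec q1 q2 hs1 hs2 hne12
      set a := (popMin q1 q2).1 with hadef
      set r1 := (popMin q1 q2).2.1 with hr1def
      set r2 := (popMin q1 q2).2.2 with hr2def
      have hpermP : (a :: (r1 ++ r2)).Perm (q1 ++ q2) := pop_perm Hstr
      have hhne : h ≠ [] := by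
        intro e; rw [e] at hhlen; simp at hhlen; omega
      have hamem : a ∈ q1 ++ q2 := hpermP.subset List.mem_cons_self
      have ha : (heappop h).1 = a := by
        apply le_antisymm
        · exact heappop_min hhne hv _ (hperm.subset hamem)
        · have hmem : (heappop h).1 ∈ q1 ++ q2 :=
            hperm.symm.subset ((heappop_spec hhne hv).2.2.subset List.mem_cons_self)
          exact Hmin _ hmem
      rw [ha]
      by_cases hK : a ≥ K
      · rw [if_pos hK, if_pos hK]
      · rw [if_neg hK, if_neg hK]
        have hl2 : (heappop h).2.length = n - 1 := by
          rw [length_heappopSnd, hhlen]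
        have hrl : r1.length + r2.length = n - 1 := by
          have := popMin_length q1 q2 hn0
          rw [← hr1def, ← hr2def] at this
          omega
        by_cases hz : n - 1 = 0
        · rw [if_pos (by omega), dif_pos (by omega)]
        · rw [if_neg (by omega), dif_neg (by omega)]
          have hsr1 : r1.Pairwise (fun a b => a ≤ b) := by
            rcases Hstr with ⟨t, he, e1, _⟩ | ⟨u, _, e1, _⟩
            · rw [e1]; rw [he] at hs1; exact (List.pairwise_cons.mp hs1).2
            · rw [e1]; exact hs1
          have hsr2 : r2.Pairwise (fun a b => a ≤ b) := by
            rcases Hstr with ⟨t, _, _, e2⟩ | ⟨u, he, _, e2⟩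
            · rw [e2]; exact hs2
            · rw [e2]; rw [he] at hs2; exact (List.pairwise_cons.mp hs2).2
          have hr2q2 : ∀ x ∈ r2, x ∈ q2 := by
            rcases Hstr with ⟨t, _, _, e2⟩ | ⟨u, he, _, e2⟩
            · rw [e2]; exact fun x hx => hx
            · rw [e2, he]; exact fun x hx => List.mem_cons_of_mem _ hx
          have hperm2 : (r1 ++ r2).Perm (heappop h).2 := by
            have hA : (a :: (r1 ++ r2)).Perm h := hpermP.trans hperm
            have hB : (a :: (heappop h).2).Perm h := by
              rw [← ha]; exact (heappop_spec hhne hv).2.2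
            exact (hA.trans hB.symm).cons_inv
          have hv2 : heapInv (heappop h).2 := (heappop_spec hhne hv).2.1
          have hne2 : ¬ (r1 = [] ∧ r2 = []) := by
            rintro ⟨e1, e2⟩; rw [e1, e2] at hrl; simp at hrl; omega
          obtain ⟨Hstr2, Hmin2⟩ := popMin_spec r1 r2 hsr1 hsr2 hne2
          set b := (popMin r1 r2).1 with hbdef
          set s1 := (popMin r1 r2).2.1 with hs1def
          set s2 := (popMin r1 r2).2.2 with hs2def
          have hpermQ : (b :: (s1 ++ s2)).Perm (r1 ++ r2) := pop_perm Hstr2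
          have hh2ne : (heappop h).2 ≠ [] := by
            intro e; rw [e] at hl2; simp at hl2; omega
          have hbmem : b ∈ r1 ++ r2 := hpermQ.subset List.mem_cons_self
          have hb : (heappop (heappop h).2).1 = b := by
            apply le_antisymm
            · exact heappop_min hh2ne hv2 _ (hperm2.subset hbmem)
            · have hmem : (heappop (heappop h).2).1 ∈ r1 ++ r2 :=
                hperm2.symm.subset
                  ((heappop_spec hh2ne hv2).2.2.subset List.mem_cons_self)
              exact Hmin2 _ hmem
          rw [hb]
          -- facts feeding the invariants of the next state
          have hab : a ≤ b :=
            Hmin b (hpermP.subset (List.mem_cons_of_mem _ hbmem))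
          have hble : ∀ x ∈ s1 ++ s2, b ≤ x := fun x hx =>
            Hmin2 x (hpermQ.subset (List.mem_cons_of_mem _ hx))
          have hss1 : s1.Pairwise (fun a b => a ≤ b) := by
            rcases Hstr2 with ⟨t, he, e1, _⟩ | ⟨u, _, e1, _⟩
            · rw [e1]; rw [he] at hsr1; exact (List.pairwise_cons.mp hsr1).2
            · rw [e1]; exact hsr1
          have hss2 : s2.Pairwise (fun a b => a ≤ b) := by
            rcases Hstr2 with ⟨t, _, _, e2⟩ | ⟨u, he, _, e2⟩
            · rw [e2]; exact hsr2
            · rw [e2]; rw [he] at hsr2; exact (List.pairwise_cons.mp hsr2).2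
          have hs2r2 : ∀ x ∈ s2, x ∈ r2 := by
            rcases Hstr2 with ⟨t, _, _, e2⟩ | ⟨u, he, _, e2⟩
            · rw [e2]; exact fun x hx => hx
            · rw [e2, he]; exact fun x hx => List.mem_cons_of_mem _ hx
          -- every surviving mixed pot is ≤ the new pot a + 2b (old invariant applied)
          have hW : ((a :: b :: (s1 ++ s2)) : List Int).Perm (q1 ++ q2) :=
            (hpermQ.cons a).trans hpermP
          have hmv : ∀ m ∈ s2, m ≤ a + 2 * b := by
            intro m hm
            have hmq2 : m ∈ q2 := hr2q2 m (hs2r2 m hm)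
            have hq2e : q2.Perm (m :: q2.erase m) := List.perm_cons_erase hmq2
            have hs2e : s2.Perm (m :: s2.erase m) := List.perm_cons_erase hm
            have h1 : (q1 ++ q2).Perm (m :: (q1 ++ q2.erase m)) :=
              (hq2e.append_left q1).trans List.perm_middle
            have h2a : (s1 ++ s2).Perm (m :: (s1 ++ s2.erase m)) :=
              (hs2e.append_left s1).trans List.perm_middle
            have h2 : ((a :: b :: (s1 ++ s2)) : List Int).Perm
                (m :: a :: b :: (s1 ++ s2.erase m)) :=
              ((h2a.cons b).cons a).trans
                (((List.Perm.swap m b _).cons a).trans (List.Perm.swap m a _))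
            have h3 : (q1 ++ q2.erase m).Perm (a :: b :: (s1 ++ s2.erase m)) :=
              ((hW.trans h1).symm.trans h2).cons_inv
            refine hPinv m (q2.erase m) hq2e a b (s1 ++ s2.erase m) h3 hab ?_
            intro x hx
            rcases List.mem_append.mp hx with hx | hx
            · exact hble x (List.mem_append.mpr (Or.inl hx))
            · exact hble x (List.mem_append.mpr (Or.inr (List.mem_of_mem_erase hx)))
          -- new queue of mixed pots stays nondecreasing
          have hsorted' : (s2 ++ [a + 2 * b]).Pairwise (fun a b => a ≤ b) := by
            refine List.pairwise_append.mpr ⟨hss2, List.pairwise_singleton _ _, ?_⟩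
            intro x hx y hy
            rw [List.mem_singleton.mp hy]
            exact hmv x hx
          -- new invariant
          have hPinv' : Pinv s1 (s2 ++ [a + 2 * b]) := by
            intro m q2'' hpm p q r hpr hpq hqr
            have hmmem : m ∈ s2 ++ [a + 2 * b] := hpm.symm.subset List.mem_cons_self
            have hmlev : m ≤ a + 2 * b := by
              rcases List.mem_append.mp hmmem with hx | hx
              · exact hmv m hx
              · rw [List.mem_singleton.mp hx]
            cases hs2nil : s2 with
            | nil =>
              -- the only removable pot is the new one; everything left is ≥ b
              rw [hs2nil] at hpm
              simp only [List.nil_append] at hpm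
              have hq2''nil : q2'' = [] := by
                have hl := hpm.length_eq
                simp only [List.length_cons, List.length_nil] at hl
                exact List.length_eq_zero_iff.mp (by omega)
              rw [hq2''nil] at hpr
              have hpmem : p ∈ s1 ++ ([] : List Int) :=
                hpr.symm.subset List.mem_cons_self
              have hqmem : q ∈ s1 ++ ([] : List Int) :=
                hpr.symm.subset (List.mem_cons_of_mem _ List.mem_cons_self)
              have hbp : b ≤ p := by
                rcases List.mem_append.mp hpmem with hx | hx
                · exact hble p (List.mem_append.mpr (Or.inl hx))
                · simp at hx
              have hbq : b ≤ q := by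
                rcases List.mem_append.mp hqmem with hx | hx
                · exact hble q (List.mem_append.mpr (Or.inl hx))
                · simp at hx
              omega
            | cons m0 t0 =>
              -- s2 nonempty forces b ≤ a + 2b, so everything in sight is ≥ b
              have hbv : b ≤ a + 2 * b := by
                have h1 := hble m0
                  (List.mem_append.mpr (Or.inr (by rw [hs2nil]; exact List.mem_cons_self)))
                have h2 := hmv m0 (by rw [hs2nil]; exact List.mem_cons_self)
                omega
              have hall : ∀ x ∈ s1 ++ q2'', b ≤ x := by
                intro x hx
                rcases List.mem_append.mp hx with hx | hx
                · exact hble x (List.mem_append.mpr (Or.inl hx))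
                · have hxs : x ∈ s2 ++ [a + 2 * b] :=
                    hpm.symm.subset (List.mem_cons_of_mem _ hx)
                  rcases List.mem_append.mp hxs with hy | hy
                  · exact hble x (List.mem_append.mpr (Or.inr hy))
                  · rw [List.mem_singleton.mp hy]; exact hbv
              have hbp : b ≤ p := hall p (hpr.symm.subset List.mem_cons_self)
              have hbq : b ≤ q :=
                hall q (hpr.symm.subset (List.mem_cons_of_mem _ List.mem_cons_self))
              omega
          -- permutation with the new heap
          have hperm3 : (s1 ++ s2).Perm (heappop (heappop h).2).2 := by
            have hA : (b :: (s1 ++ s2)).Perm (heappop h).2 := hpermQ.trans hperm2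
            have hB : (b :: (heappop (heappop h).2).2).Perm (heappop h).2 := by
              rw [← hb]; exact (heappop_spec hh2ne hv2).2.2
            exact (hA.trans hB.symm).cons_inv
          obtain ⟨HI4, HP4⟩ :=
            heappush_spec ((heappop_spec hh2ne hv2).2.1) (a + 2 * b)
          have hpermF : (s1 ++ (s2 ++ [a + 2 * b])).Perm
              (heappush (heappop (heappop h).2).2 (a + 2 * b)) := by
            rw [← List.append_assoc]
            exact (List.perm_append_singleton _ _).trans ((hperm3.cons _).trans HP4.symm)
          have hlenF : s1.length + (s2 ++ [a + 2 * b]).length = n - 1 := by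
            have := popMin_length r1 r2 (by omega)
            rw [← hs1def, ← hs2def] at this
            simp only [List.length_append, List.length_cons, List.length_nil]
            omega
          exact ih (n - 1) (by omega) f
            (heappush (heappop (heappop h).2).2 (a + 2 * b)) s1 (s2 ++ [a + 2 * b]) K (ans + 1)
            hlenF (by omega) HI4 hpermF hss1 hsorted' hPinv'

-- ===== VERDICT (by name: the statement is the Claim_ definition above) =====
theorem solution_spec : Claim_equal_solution := by
  intro scoville K _
  unfold Spec_solution solution solution_alt
  obtain ⟨HI, HP⟩ := heapify_spec scoville
  refine loop_eq ((PySem.List.sorted scoville (fun x => x) false).length + [].length)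
    (scoville.length + 1) (heapify scoville)
    (PySem.List.sorted scoville (fun x => x) false) [] K 0 rfl
    ?_ HI ?_ ?_ (List.Pairwise.nil) ?_
  · have := (PySem.List.sorted_perm scoville (fun x => x) false).length_eq
    simp only [List.length_nil]
    omega
  · rw [List.append_nil]
    exact (PySem.List.sorted_perm _ _ _).trans HP.symm
  · simpa using PySem.List.sorted_pairwise (xs := scoville) (key := fun x => x)
  · intro m q2' hpm
    exact absurd hpm.length_eq (by simp)
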